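-- pv_equiv track=rewrite | github.com/hanksterhan/SzimplaCoffee | backend/src/szimplacoffee/api/products.py | _parse_categories
-- ===== SOURCE A (Python) =====
-- from typing import Any
--
-- def _normalize_query_default(value: Any):
--     if hasattr(value, "default"):
--         return value.default
--     return value
--
-- def _parse_categories(category: str | None) -> list[str]:
--     category = _normalize_query_default(category)
--     if not category:
--         return ["coffee"]
--     categories = [part.strip() for part in category.split(",") if part.strip()]
--     if not categories:
--         return ["coffee"]
--     if "all" in categories:
--         return ["all"]
--     return list(dict.fromkeys(categories))
-- ===== SOURCE B (Python) =====
-- from typing import Any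
--
-- def _normalize_query_default(value: Any):
--     if hasattr(value, "default"):
--         return value.default
--     return value
--
-- def _parse_categories(category):
--     # Character-level scanner: one pass over the characters (with a sentinel
--     # comma appended), building the current token and finalizing it at each
--     # comma -- no call to split, no staged passes, early exit on "all".
--     category = _normalize_query_default(category)
--     if not category:
--         return ["coffee"]
--     result = []
--     cur = ""
--     for ch in category + ",":
--         if ch != ",":
--             cur += ch
--             continue
--         x = cur.strip()
--         cur = ""
--         if x == "all":
--             return ["all"]
--         if x and x not in result:
--             result.append(x)
--     return result if result else ["coffee"]
-- ===== Notes on version B (the rewrite author's own statement) =====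
-- stated objective: alternative
-- what changed: Replaces A's split/strip-comprehension + 'all' membership scan + dict.fromkeys dedup pipeline with a single character-level scanner that builds tokens itself (sentinel comma), strips and classifies each token as it is completed, returns ['all'] mid-scan, and appends only first occurrences.
import Mathlib
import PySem

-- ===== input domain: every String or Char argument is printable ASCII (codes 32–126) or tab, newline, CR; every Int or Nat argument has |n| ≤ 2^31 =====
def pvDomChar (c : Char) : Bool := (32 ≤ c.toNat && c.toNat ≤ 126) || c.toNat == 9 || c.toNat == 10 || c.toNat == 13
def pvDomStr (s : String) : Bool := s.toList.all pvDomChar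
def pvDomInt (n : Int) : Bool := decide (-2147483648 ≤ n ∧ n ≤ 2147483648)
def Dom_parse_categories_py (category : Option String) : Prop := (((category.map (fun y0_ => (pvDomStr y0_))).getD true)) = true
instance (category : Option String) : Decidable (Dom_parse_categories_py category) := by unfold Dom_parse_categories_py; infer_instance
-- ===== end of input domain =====

-- B replaces A's split/strip/'all'-scan/dict.fromkeys pipeline by a single character-level
-- scanner (sentinel comma, tokens finalized in-scan, early 'all' exit, first-occurrence append);
-- same cost, a genuinely different algorithm.
-- _normalize_query_default is the identity on str/None inputs (no '.default' attribute): ported as identity.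

-- ===== PORT A =====
def parse_categories_py (category : Option String) : List String :=
  match category with
  | none => ["coffee"]                    -- 'if not category' (None is falsy)
  | some c =>
    if c = "" then ["coffee"]             -- 'if not category' (empty string is falsy)
    else
      let categories := (((PySem.Str.split? c ",").getD []).filter
          (fun part => PySem.Str.strip part ≠ "")).map PySem.Str.strip
      if categories = [] then ["coffee"]
      else if "all" ∈ categories then ["all"]
      else PySem.List.dedup categories    -- list(dict.fromkeys(categories))

-- ===== PORT B =====
-- the 'for ch in category + ","' loop: cur = current token's chars, result = kept categories
def pvScan : List Char → List Char → List String → List String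
  | [], _, result => if result = [] then ["coffee"] else result   -- 'return result if result else ["coffee"]'
  | ch :: rest, cur, result =>
    if ch ≠ ',' then pvScan rest (cur ++ [ch]) result             -- 'cur += ch; continue'
    else
      let x := PySem.Str.strip (String.ofList cur)
      if x = "all" then ["all"]                                   -- early return
      else if x ≠ "" && !result.contains x then pvScan rest [] (result ++ [x])
      else pvScan rest [] result

def parse_categories_py_alt (category : Option String) : List String :=
  match category with
  | none => ["coffee"]
  | some c =>
    if c = "" then ["coffee"]
    else pvScan (c.toList ++ [',']) [] []

-- ===== PRECONDITION & SPEC =====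
def Spec_parse_categories_py (category : Option String) (out : List String) : Prop := out = parse_categories_py_alt category
instance (category : Option String) (out : List String) : Decidable (Spec_parse_categories_py category out) := by unfold Spec_parse_categories_py; infer_instance

-- ===== CLAIM =====
def Claim_equal_parse_categories_py : Prop := ∀ (category : Option String), Dom_parse_categories_py category → Spec_parse_categories_py category (parse_categories_py category)

-- ===== LEMMAS AND PROOFS =====

-- Proof-only simple recursion computing Python's s.split(",") on char lists.
def pvSplitC : List Char → List (List Char)
  | [] => [[]]
  | c :: r =>
    if c = ',' then [] :: pvSplitC r
    else match pvSplitC r with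
      | [] => [[c]]
      | h :: t => (c :: h) :: t

theorem pvSplitC_ne_nil (l : List Char) : pvSplitC l ≠ [] := by
  cases l with
  | nil => simp [pvSplitC]
  | cons c r =>
    simp only [pvSplitC]
    split_ifs
    · simp
    · cases h : pvSplitC r <;> simp

-- PySem's fueled splitter agrees with pvSplitC for a one-char separator.
theorem splitOn_go_eq (fuel : Nat) (l cur : List Char) (acc : List (List Char))
    (hf : l.length < fuel) :
    PySem.Chars.splitOn.go [','] fuel l cur acc =
      acc.reverse ++ (match pvSplitC l with
        | [] => []
        | h :: t => (cur.reverse ++ h) :: t) := by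
  induction fuel generalizing l cur acc with
  | zero => omega
  | succ f ih =>
    cases l with
    | nil => simp [PySem.Chars.splitOn.go, pvSplitC]
    | cons c rest =>
      rw [PySem.Chars.splitOn.go]
      by_cases hc : c = ','
      · subst hc
        have hpre : List.isPrefixOf [','] (',' :: rest) = true := by
          simp [List.isPrefixOf]
        simp only [hpre, if_true, List.length_cons, List.drop_succ_cons, List.length_nil,
          List.drop_zero]
        rw [ih rest [] (cur.reverse :: acc) (by simpa using Nat.lt_of_succ_lt_succ hf)]
        have := pvSplitC_ne_nil rest
        cases h : pvSplitC rest with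
        | nil => exact absurd h this
        | cons h2 t2 => simp [pvSplitC, h]
      · have hpre : List.isPrefixOf [','] (c :: rest) = false := by
          simp [List.isPrefixOf]
          intro h; exact absurd h.symm hc
        simp only [hpre]
        rw [ih rest (c :: cur) acc (by simpa using Nat.lt_of_succ_lt_succ hf)]
        have := pvSplitC_ne_nil rest
        cases h : pvSplitC rest with
        | nil => exact absurd h this
        | cons h2 t2 => simp [pvSplitC, hc, h]

theorem splitOn_eq_pvSplitC (l : List Char) :
    PySem.Chars.splitOn l [','] = pvSplitC l := by
  unfold PySem.Chars.splitOn
  rw [splitOn_go_eq l.length.succ l [] [] (Nat.lt_succ_self _)]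
  have := pvSplitC_ne_nil l
  cases h : pvSplitC l with
  | nil => exact absurd h this
  | cons h2 t2 => simp

-- Splitting a comma-free prefix off.
theorem pvSplitC_append (m l : List Char) (hm : ',' ∉ m) :
    pvSplitC (m ++ l) = (match pvSplitC l with
      | [] => []
      | h :: t => (m ++ h) :: t) := by
  induction m with
  | nil =>
    have := pvSplitC_ne_nil l
    cases h : pvSplitC l with
    | nil => exact absurd h this
    | cons h2 t2 => simp [h]
  | cons c m ih =>
    have hc : c ≠ ',' := fun h => hm (h ▸ List.mem_cons_self ..)
    have hm' : ',' ∉ m := fun h => hm (List.mem_cons_of_mem _ h)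
    simp only [List.cons_append, pvSplitC, hc, if_false, ih hm']
    have := pvSplitC_ne_nil l
    cases h : pvSplitC l with
    | nil => exact absurd h this
    | cons h2 t2 => simp

-- Token-level processor: what pvScan does to each completed token, over the token list.
def pvParts : List String → List String → List String
  | [], result => if result = [] then ["coffee"] else result
  | t :: rest, result =>
    let x := PySem.Str.strip t
    if x = "all" then ["all"]
    else if x ≠ "" && !result.contains x then pvParts rest (result ++ [x])
    else pvParts rest result

-- The char scanner equals the token processor on the tokens of the remaining input.
theorem pvSplitC_no_comma (m : List Char) (hm : ',' ∉ m) : pvSplitC m = [m] := by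
  have h := pvSplitC_append m [] hm
  simpa [pvSplitC] using h

theorem pvScan_eq_pvParts (l cur : List Char) (result : List String) (hcur : ',' ∉ cur) :
    pvScan (l ++ [',']) cur result =
      pvParts ((pvSplitC (cur ++ l)).map String.ofList) result := by
  have hcc : ¬ ((',' : Char) ≠ ',') := by simp
  induction l generalizing cur result with
  | nil =>
    rw [List.append_nil, pvSplitC_no_comma cur hcur]
    simp only [List.nil_append, pvScan, if_neg hcc, List.map_cons, List.map_nil]
    split_ifs <;> simp_all [pvParts]
  | cons c rest ih =>
    by_cases hc : c = ','
    · subst hc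
      rw [pvSplitC_append cur (',' :: rest) hcur]
      have hsr := pvSplitC_ne_nil rest
      cases hs : pvSplitC rest with
      | nil => exact absurd hs hsr
      | cons h2 t2 =>
        simp only [pvSplitC, hs, List.cons_append, pvScan, if_neg hcc]
        have h1 := ih (cur := []) (result := result ++ [PySem.Str.strip (String.ofList cur)]) (by simp)
        have h0 := ih (cur := []) (result := result) (by simp)
        simp only [List.nil_append, hs] at h1 h0
        split_ifs <;> simp_all [pvParts]
    · have hcur' : ',' ∉ cur ++ [c] := by
        intro h; rcases List.mem_append.1 h with h | h
        · exact hcur h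
        · exact hc (List.mem_singleton.1 h).symm
      simp only [List.cons_append, pvScan, if_pos (show c ≠ ',' from hc)]
      rw [ih (cur ++ [c]) result hcur', List.append_assoc]
      simp

-- The token processor, characterised by A's three passes.
theorem pvParts_eq (parts acc : List String) :
    pvParts parts acc =
      (let clean := ((parts.filter (fun p => PySem.Str.strip p ≠ "")).map PySem.Str.strip)
       if "all" ∈ clean then ["all"]
       else
         let r := clean.foldl PySem.Set.add acc
         if r = [] then ["coffee"] else r) := by
  induction parts generalizing acc with
  | nil => simp [pvParts]
  | cons part rest ih =>
    simp only [pvParts]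
    by_cases h0 : PySem.Str.strip part = ""
    · rw [List.filter_cons_of_neg (by simp [h0])]
      have hna : PySem.Str.strip part ≠ "all" := by simp [h0]
      simp [h0, ih]
    · rw [List.filter_cons_of_pos (by simp [h0])]
      by_cases hall : PySem.Str.strip part = "all"
      · simp [hall]
      · have hall' : "all" ≠ PySem.Str.strip part := fun h => hall h.symm
        by_cases hm : PySem.Str.strip part ∈ acc
        · simp [h0, hall, hm, ih, PySem.Set.add]
          refine if_congr ?_ rfl rfl
          simp [List.mem_cons, hall']
        · simp [h0, hall, hm, ih, PySem.Set.add]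
          refine if_congr ?_ rfl rfl
          simp [List.mem_cons, hall']

-- ===== VERDICT =====
theorem parse_categories_py_spec : Claim_equal_parse_categories_py := by
  intro category _
  unfold Spec_parse_categories_py parse_categories_py parse_categories_py_alt
  match category with
  | none => rfl
  | some c =>
    by_cases hc : c = ""
    · simp [hc]
    · simp only [hc, if_false]
      rw [pvScan_eq_pvParts c.toList [] [] (by simp), List.nil_append, pvParts_eq]
      have hsplit : (PySem.Str.split? c ",").getD [] = (pvSplitC c.toList).map String.ofList := by
        simp [PySem.Str.split?, PySem.Chars.split?, splitOn_eq_pvSplitC]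
      rw [hsplit]
      set clean := ((((pvSplitC c.toList).map String.ofList).filter
          (fun p => PySem.Str.strip p ≠ "")).map PySem.Str.strip) with hclean
      by_cases hnil : clean = []
      · simp [hnil]
      · by_cases hall : "all" ∈ clean
        · simp [hall, hnil]
        · have hfold : clean.foldl PySem.Set.add [] = PySem.List.dedup clean := by
            rw [PySem.List.dedup_eq_ofList, PySem.Set.ofList_eq_foldl]
          have hne : PySem.Set.ofList clean ≠ [] := by
            intro h
            apply hnil
            cases hcl : clean with
            | nil => rfl
            | cons x t =>
              exfalso
              have hx : x ∈ PySem.Set.ofList clean := by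
                rw [PySem.Set.mem_ofList, hcl]; exact List.mem_cons_self ..
              rw [h] at hx
              simp at hx
          simp [hall, hfold, hne]
          exact fun h => absurd h hnil
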